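-- pv_equiv track=rewrite | github.com/tavonmeng/anti_pro | cursor_sh/backend/app/api/ai_order_agent.py | _build_status_overview
-- ===== SOURCE A (Python) =====
-- _STATUS_MAP = {
--     "draft": "草稿", "pending_assign": "待分配", "in_production": "制作中",
--     "pending_review": "待审核", "review_rejected": "审核驳回",
--     "preview_ready": "初稿就绪", "final_preview": "终稿就绪",
--     "revision_needed": "需修改", "completed": "已完成", "cancelled": "已取消"
-- }
--
-- def _get_status_val(o: dict) -> str:
--     val = o.get("status", "")
--     return val.value if hasattr(val, 'value') else val
--
-- def _get_status_text(o: dict) -> str: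
--     return _STATUS_MAP.get(_get_status_val(o), _get_status_val(o))
--
-- def _build_status_overview(orders: list) -> str:
--     """生成自然语言的状态概览"""
--     counts: dict[str, int] = {}
--     for o in orders:
--         st = _get_status_text(o)
--         counts[st] = counts.get(st, 0) + 1
--
--     priority = ["制作中", "待审核", "需修改", "待分配", "初稿就绪", "终稿就绪", "审核驳回", "已完成", "草稿"]
--     parts = [f"{counts[s]}个{s}" for s in priority if counts.get(s, 0) > 0]
--     for s, c in counts.items():
--         if s not in priority and c > 0:
--             parts.append(f"{c}个{s}")
--     return "、".join(parts)
-- ===== SOURCE B (Python) =====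
-- _STATUS_MAP = {
--     "draft": "草稿", "pending_assign": "待分配", "in_production": "制作中",
--     "pending_review": "待审核", "review_rejected": "审核驳回",
--     "preview_ready": "初稿就绪", "final_preview": "终稿就绪",
--     "revision_needed": "需修改", "completed": "已完成", "cancelled": "已取消"
-- }
--
-- def _get_status_val(o: dict) -> str:
--     val = o.get("status", "")
--     return val.value if hasattr(val, 'value') else val
--
-- def _get_status_text(o: dict) -> str:
--     return _STATUS_MAP.get(_get_status_val(o), _get_status_val(o))
--
-- def _build_status_overview(orders: list) -> str:
--     texts = [_get_status_text(o) for o in orders]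
--     distinct = list(dict.fromkeys(texts))
--     priority = ["制作中", "待审核", "需修改", "待分配", "初稿就绪", "终稿就绪", "审核驳回", "已完成", "草稿"]
--     # total order: priority rank first, then first-appearance rank for the rest
--     def key(s):
--         return priority.index(s) if s in priority else len(priority) + distinct.index(s)
--     ordered = sorted(distinct, key=key)
--     return "、".join(f"{texts.count(s)}个{s}" for s in ordered)
-- ===== Notes on version B (the rewrite author's own statement) =====
-- stated objective: alternative
-- what changed: A counts into a dict and then emits parts with two separate output passes (a filtered scan of the priority list plus a leftover loop over the dict items); B deduplicates the status texts once and produces the ordered output with a single sort under an explicit total rank (priority index, then first-appearance index), counting each distinct status with list.count.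
import Mathlib
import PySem

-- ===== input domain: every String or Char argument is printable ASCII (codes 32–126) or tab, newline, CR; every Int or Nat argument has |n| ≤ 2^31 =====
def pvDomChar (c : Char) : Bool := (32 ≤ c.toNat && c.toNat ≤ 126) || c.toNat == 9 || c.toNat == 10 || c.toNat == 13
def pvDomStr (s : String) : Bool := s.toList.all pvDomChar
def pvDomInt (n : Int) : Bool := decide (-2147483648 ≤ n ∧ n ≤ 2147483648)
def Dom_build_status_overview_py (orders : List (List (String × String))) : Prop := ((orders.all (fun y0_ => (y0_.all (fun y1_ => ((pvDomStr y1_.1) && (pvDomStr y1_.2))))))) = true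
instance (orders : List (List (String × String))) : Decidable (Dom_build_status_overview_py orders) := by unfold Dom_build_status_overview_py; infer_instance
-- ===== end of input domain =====

-- B replaces A's two output scans (priority filter + leftover items loop) by one stable sort of the
-- distinct statuses under an explicit total rank, and the count dict by dedup + list.count ("alternative").

-- ===== PORT A =====
def pvStatusMap : PySem.Dict String String := PySem.Dict.ofList
  [("draft", "草稿"), ("pending_assign", "待分配"), ("in_production", "制作中"),
   ("pending_review", "待审核"), ("review_rejected", "审核驳回"),
   ("preview_ready", "初稿就绪"), ("final_preview", "终稿就绪"),
   ("revision_needed", "需修改"), ("completed", "已完成"), ("cancelled", "已取消")]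

-- o.get("status", ""); under the type convention the value is a str, which has no '.value'
-- attribute, so the hasattr branch never fires and the function returns val itself.
def pvGetStatusVal (o : List (String × String)) : String :=
  (PySem.Dict.mk o).getD "status" ""

def pvGetStatusText (o : List (String × String)) : String :=
  pvStatusMap.getD (pvGetStatusVal o) (pvGetStatusVal o)

def pvPriority : List String :=
  ["制作中", "待审核", "需修改", "待分配", "初稿就绪", "终稿就绪", "审核驳回", "已完成", "草稿"]

def build_status_overview_py (orders : List (List (String × String))) : String :=
  let counts : PySem.Dict String Int :=
    orders.foldl (fun d o => d.modify (pvGetStatusText o) 0 (· + 1)) PySem.Dict.empty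
  -- counts[s] is ported as getD s 0: the guard counts.get(s, 0) > 0 ensures the key is present
  let parts : List String :=
    pvPriority.foldl (fun ps s =>
      if counts.getD s 0 > 0 then ps ++ [PySem.Int.toStr (counts.getD s 0) ++ "个" ++ s] else ps) []
  let parts : List String :=
    counts.items.foldl (fun ps sc =>
      if sc.1 ∉ pvPriority ∧ sc.2 > 0 then ps ++ [PySem.Int.toStr sc.2 ++ "个" ++ sc.1] else ps) parts
  PySem.Str.join "、" parts

-- ===== PORT B =====
-- key(s) = priority.index(s) if s in priority else len(priority) + distinct.index(s);
-- distinct.index is only ever applied to members of distinct, where index? is some (getD 0 unreachable).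
def pvKey (distinct : List String) (s : String) : Int :=
  match PySem.List.index? pvPriority s with
  | some k => (k : Int)
  | none => PySem.List.len pvPriority + ((PySem.List.index? distinct s).getD 0 : Int)

def build_status_overview_py_alt (orders : List (List (String × String))) : String :=
  let texts : List String := orders.map pvGetStatusText
  let distinct : List String := PySem.List.dedup texts
  let ordered : List String := PySem.List.sorted distinct (pvKey distinct)
  PySem.Str.join "、" (ordered.map (fun s =>
    PySem.Int.toStr (PySem.List.count texts s : Int) ++ "个" ++ s))

-- ===== PRECONDITION & SPEC =====
def Spec_build_status_overview_py (orders : List (List (String × String))) (out : String) : Prop := out = build_status_overview_py_alt orders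
instance (orders : List (List (String × String))) (out : String) : Decidable (Spec_build_status_overview_py orders out) := by unfold Spec_build_status_overview_py; infer_instance

-- ===== CLAIM (what is proved, stated in full; the proofs are below) =====
def Claim_equal_build_status_overview_py : Prop := ∀ (orders : List (List (String × String))), Dom_build_status_overview_py orders → Spec_build_status_overview_py orders (build_status_overview_py orders)

-- ===== LEMMAS AND PROOFS =====

-- in a duplicate-free list, positions (index?) are strictly increasing along the list
theorem pv_pairwise_index_lt (l : List String) (h : l.Nodup) :
    l.Pairwise (fun a b => ∀ i j, PySem.List.index? l a = some i →
      PySem.List.index? l b = some j → i < j) := by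
  induction l with
  | nil => exact List.Pairwise.nil
  | cons x l ih =>
    rcases List.nodup_cons.mp h with ⟨hx, hl⟩
    refine List.Pairwise.cons ?_ (((ih hl).imp_of_mem ?_))
    · intro b hb i j hi hj
      rw [PySem.List.index?_cons_self] at hi
      obtain rfl := Option.some_inj.mp hi
      rw [PySem.List.index?_cons_of_ne l (ne_of_mem_of_not_mem hb hx).symm] at hj
      rcases Option.map_eq_some_iff.mp hj with ⟨j', _, rfl⟩
      omega
    · intro a b ha hb hr i j hi hj
      rw [PySem.List.index?_cons_of_ne l (ne_of_mem_of_not_mem ha hx).symm] at hi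
      rw [PySem.List.index?_cons_of_ne l (ne_of_mem_of_not_mem hb hx).symm] at hj
      rcases Option.map_eq_some_iff.mp hi with ⟨i', hi', rfl⟩
      rcases Option.map_eq_some_iff.mp hj with ⟨j', hj', rfl⟩
      exact Nat.add_lt_add_right (hr i' j' hi' hj') 1

theorem pv_key_of_mem (d : List String) {s : String} (hs : s ∈ pvPriority) :
    ∃ k, PySem.List.index? pvPriority s = some k ∧ pvKey d s = (k : Int) ∧ k < 9 := by
  rcases Option.isSome_iff_exists.mp ((PySem.List.index?_isSome_iff pvPriority s).mpr hs) with ⟨k, hk⟩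
  refine ⟨k, hk, by unfold pvKey; rw [hk], ?_⟩
  rcases PySem.List.getElem_of_index?_eq_some hk with ⟨hlt, -, -⟩
  simpa [pvPriority] using hlt

theorem pv_key_of_not_mem (d : List String) {s : String} (hs : s ∉ pvPriority) :
    pvKey d s = 9 + ((PySem.List.index? d s).getD 0 : Int) := by
  unfold pvKey
  rw [(PySem.List.index?_eq_none_iff pvPriority s).mpr hs]
  simp [PySem.List.len_eq, pvPriority]

-- the sorted distinct statuses are: priority statuses in priority order, then the rest in first-appearance order
theorem pv_sorted_split (t : List String) :
    PySem.List.sorted (PySem.List.dedup t) (pvKey (PySem.List.dedup t)) =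
      pvPriority.filter (fun s => decide (s ∈ PySem.List.dedup t)) ++
      (PySem.List.dedup t).filter (fun s => decide (s ∉ pvPriority)) := by
  have hd : (PySem.List.dedup t).Nodup := PySem.List.nodup_dedup t
  have hp : pvPriority.Nodup := by decide
  apply PySem.List.sorted_eq_of_perm_of_pairwise_lt
  · -- permutation of dedup t
    have h1 : (pvPriority.filter (fun s => decide (s ∈ PySem.List.dedup t))).Perm
        ((PySem.List.dedup t).filter (fun s => decide (s ∈ pvPriority))) := by
      rw [List.perm_ext_iff_of_nodup (hp.filter _) (hd.filter _)]
      intro a; simp [List.mem_filter]; tauto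
    have h2 := List.filter_append_perm (fun s => decide (s ∈ pvPriority)) (PySem.List.dedup t)
    refine List.Perm.trans (List.Perm.append h1 (List.Perm.refl _)) ?_
    simpa [decide_not] using h2
  · -- strictly increasing keys
    rw [List.pairwise_append]
    refine ⟨?_, ?_, ?_⟩
    · refine ((pv_pairwise_index_lt pvPriority hp).filter _).imp_of_mem ?_
      intro a b ha hb hr
      have ha' := (List.mem_filter.mp ha).1
      have hb' := (List.mem_filter.mp hb).1
      rcases pv_key_of_mem (PySem.List.dedup t) ha' with ⟨i, hi, hki, -⟩
      rcases pv_key_of_mem (PySem.List.dedup t) hb' with ⟨j, hj, hkj, -⟩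
      rw [hki, hkj]; exact_mod_cast hr i j hi hj
    · refine ((pv_pairwise_index_lt _ hd).filter _).imp_of_mem ?_
      intro a b ha hb hr
      have ha2 : a ∉ pvPriority := by simpa using (List.mem_filter.mp ha).2
      have hb2 : b ∉ pvPriority := by simpa using (List.mem_filter.mp hb).2
      have ha1 := List.mem_of_mem_filter ha
      have hb1 := List.mem_of_mem_filter hb
      rcases Option.isSome_iff_exists.mp
        ((PySem.List.index?_isSome_iff (PySem.List.dedup t) a).mpr ha1) with ⟨i, hi⟩
      rcases Option.isSome_iff_exists.mp
        ((PySem.List.index?_isSome_iff (PySem.List.dedup t) b).mpr hb1) with ⟨j, hj⟩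
      rw [pv_key_of_not_mem _ ha2, pv_key_of_not_mem _ hb2, hi, hj]
      have := hr i j hi hj
      simp; omega
    · intro a ha b hb
      have ha' := (List.mem_filter.mp ha).1
      have hb2 : b ∉ pvPriority := by simpa using (List.mem_filter.mp hb).2
      rcases pv_key_of_mem (PySem.List.dedup t) ha' with ⟨i, -, hki, hi9⟩
      rw [hki, pv_key_of_not_mem _ hb2]
      have : (0 : Int) ≤ ((PySem.List.index? (PySem.List.dedup t) b).getD 0 : Int) := by positivity
      omega

theorem build_status_overview_py_eq (orders : List (List (String × String))) :
    build_status_overview_py orders = build_status_overview_py_alt orders := by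
  unfold build_status_overview_py build_status_overview_py_alt
  set t : List String := orders.map pvGetStatusText with ht
  -- A's counting loop is Counter(texts)
  have hc : orders.foldl (fun d o => d.modify (pvGetStatusText o) 0 (· + 1)) PySem.Dict.empty
      = PySem.Dict.counter t := by
    rw [PySem.Dict.counter_eq_foldl, ht, List.foldl_map]
  simp only [hc]
  -- A's two accumulation loops as filters + maps
  rw [PySem.List.foldl_append_ite (fun s => (PySem.Dict.counter t).getD s 0 > 0)
      (fun s => PySem.Int.toStr ((PySem.Dict.counter t).getD s 0) ++ "个" ++ s)]
  rw [PySem.List.foldl_append_ite (fun sc : String × Int => sc.1 ∉ pvPriority ∧ sc.2 > 0)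
      (fun sc : String × Int => PySem.Int.toStr sc.2 ++ "个" ++ sc.1)]
  rw [PySem.Dict.items_counter, List.filter_map, List.map_map, List.nil_append]
  rw [pv_sorted_split t]
  -- identify predicates and mapped functions on both sides
  have hmem : ∀ s : String, (0 < List.count s t) ↔ s ∈ PySem.List.dedup t := by
    intro s; rw [PySem.List.mem_dedup]; exact List.count_pos_iff
  have hf1 : pvPriority.filter (fun s => decide ((PySem.Dict.counter t).getD s 0 > 0))
      = pvPriority.filter (fun s => decide (s ∈ PySem.List.dedup t)) := by
    apply List.filter_congr; intro s _
    simp [PySem.Dict.getD_counter, hmem s]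
  have hf2 : (PySem.List.dedup t).filter
        ((fun sc : String × Int => decide (sc.1 ∉ pvPriority ∧ sc.2 > 0)) ∘
          (fun k => (k, (List.count k t : Int))))
      = (PySem.List.dedup t).filter (fun s => decide (s ∉ pvPriority)) := by
    apply List.filter_congr; intro s hs
    have hst : s ∈ t := (PySem.List.mem_dedup t s).mp (by simpa [PySem.Set.ofList] using hs)
    simp [Function.comp, hst]
  rw [show PySem.Set.ofList t = PySem.List.dedup t from (PySem.List.dedup_eq_ofList t).symm] at *
  rw [hf1, hf2]
  have hm1 : (pvPriority.filter (fun s => decide (s ∈ PySem.List.dedup t))).map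
        (fun s => PySem.Int.toStr ((PySem.Dict.counter t).getD s 0) ++ "个" ++ s)
      = (pvPriority.filter (fun s => decide (s ∈ PySem.List.dedup t))).map
        (fun s => PySem.Int.toStr (PySem.List.count t s : Int) ++ "个" ++ s) := by
    apply List.map_congr_left; intro s _
    simp [PySem.Dict.getD_counter, PySem.List.count_eq]
  have hm2 : ((PySem.List.dedup t).filter (fun s => decide (s ∉ pvPriority))).map
        ((fun sc : String × Int => PySem.Int.toStr sc.2 ++ "个" ++ sc.1) ∘
          (fun k => (k, (List.count k t : Int))))
      = ((PySem.List.dedup t).filter (fun s => decide (s ∉ pvPriority))).map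
        (fun s => PySem.Int.toStr (PySem.List.count t s : Int) ++ "个" ++ s) := by
    apply List.map_congr_left; intro s _
    simp [Function.comp, PySem.List.count_eq]
  rw [hm1, hm2, ← List.map_append]

-- ===== VERDICT (by name: the statement is the Claim_ definition above) =====
theorem build_status_overview_py_spec : Claim_equal_build_status_overview_py := by
  intro orders _
  exact build_status_overview_py_eq orders
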